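-- pv_equiv track=rewrite | github.com/KinomotoMio/ZhiYan | skills/slidev-deck-quality/scripts/review_deck.py | _consume_slide_frontmatter
-- ===== SOURCE A (Python) =====
-- def _consume_slide_frontmatter(lines: list[str], start_index: int) -> tuple[list[str] | None, int]:
--     index = start_index
--     block: list[str] = []
--     while index < len(lines):
--         stripped = lines[index].strip()
--         if stripped == "---":
--             return (block if _looks_like_slide_frontmatter(block) else None, index + 1)
--         block.append(lines[index])
--         index += 1
--     return None, start_index
--
-- def _looks_like_slide_frontmatter(lines: list[str]) -> bool:
--     meaningful = [line.strip() for line in lines if line.strip() and not line.strip().startswith("#")]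
--     if not meaningful:
--         return False
--     return all(":" in line and not line.startswith("::") for line in meaningful)
-- ===== SOURCE B (Python) =====
-- def _consume_slide_frontmatter(lines: list[str], start_index: int) -> tuple[list[str] | None, int]:
--     # Single fused pass: validate while scanning, materialize the block only when valid.
--     n = len(lines)
--     index = start_index
--     has_meaningful = False
--     all_valid = True
--     while index < n:
--         s = lines[index].strip()
--         if s == "---":
--             if has_meaningful and all_valid:
--                 return ([lines[i] for i in range(start_index, index)], index + 1)
--             return (None, index + 1)
--         if s and not s.startswith("#"):
--             has_meaningful = True
--             all_valid = all_valid and ":" in s and not s.startswith("::")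
--         index += 1
--     return (None, start_index)
-- ===== Notes on version B (the rewrite author's own statement) =====
-- stated objective: alternative
-- what changed: B fuses the helper's separate validation pass into the scan loop via two boolean accumulators (has_meaningful/all_valid) and drops the running block accumulator, materializing the block from the index range only when the frontmatter is valid.
import Mathlib
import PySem

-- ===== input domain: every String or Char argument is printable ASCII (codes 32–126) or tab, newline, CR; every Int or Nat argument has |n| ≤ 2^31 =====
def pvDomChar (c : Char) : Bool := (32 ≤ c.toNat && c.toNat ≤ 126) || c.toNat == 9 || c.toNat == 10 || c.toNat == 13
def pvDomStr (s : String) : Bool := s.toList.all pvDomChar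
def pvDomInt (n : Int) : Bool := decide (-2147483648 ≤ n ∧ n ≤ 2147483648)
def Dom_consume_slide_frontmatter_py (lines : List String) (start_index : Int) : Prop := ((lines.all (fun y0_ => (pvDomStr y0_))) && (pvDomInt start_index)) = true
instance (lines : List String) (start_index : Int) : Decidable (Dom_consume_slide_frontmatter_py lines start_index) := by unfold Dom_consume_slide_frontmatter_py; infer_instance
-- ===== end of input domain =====

-- B fuses the helper's separate validation pass into the scan loop (two boolean accumulators) and
-- materializes the block from the index range only when valid; same return value everywhere A returns.

-- ===== PORT A =====
-- _looks_like_slide_frontmatter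
def pvMeaningful (block : List String) : List String :=
  (block.filter (fun l => decide (PySem.Str.strip l ≠ "") && !(PySem.Str.startswith (PySem.Str.strip l) "#"))).map PySem.Str.strip

def pvLooksLike (block : List String) : Bool :=
  let meaningful := pvMeaningful block
  if meaningful.isEmpty then false
  else meaningful.all (fun s => PySem.Str.isIn ":" s && !(PySem.Str.startswith s "::"))

-- while loop of A; lines[index] is in range on every admitted input (Pre_), getD's default is never used there
def pvALoop (lines : List String) (start_index : Int) (index : Int) (block : List String) :
    Option (List String) × Int :=
  if _h : index < (lines.length : Int) then
    let stripped := PySem.Str.strip (PySem.List.pyGetD lines index "")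
    if stripped = "---" then
      ((if pvLooksLike block then some block else none), index + 1)
    else
      pvALoop lines start_index (index + 1) (block ++ [PySem.List.pyGetD lines index ""])
  else (none, start_index)
termination_by ((lines.length : Int) - index).toNat
decreasing_by omega

def consume_slide_frontmatter_py (lines : List String) (start_index : Int) : Option (List String) × Int :=
  pvALoop lines start_index start_index []

-- ===== PORT B =====
def pvBLoop (lines : List String) (start_index : Int) (index : Int) (has_meaningful all_valid : Bool) :
    Option (List String) × Int :=
  if _h : index < (lines.length : Int) then
    let s := PySem.Str.strip (PySem.List.pyGetD lines index "")
    if s = "---" then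
      if has_meaningful && all_valid then
        (some ((PySem.List.pyRange start_index index 1).map (fun i => PySem.List.pyGetD lines i "")), index + 1)
      else (none, index + 1)
    else
      if decide (s ≠ "") && !(PySem.Str.startswith s "#") then
        pvBLoop lines start_index (index + 1) true
          (all_valid && PySem.Str.isIn ":" s && !(PySem.Str.startswith s "::"))
      else
        pvBLoop lines start_index (index + 1) has_meaningful all_valid
  else (none, start_index)
termination_by ((lines.length : Int) - index).toNat
decreasing_by all_goals omega

def consume_slide_frontmatter_py_alt (lines : List String) (start_index : Int) : Option (List String) × Int :=
  pvBLoop lines start_index start_index false true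

-- ===== PRECONDITION & SPEC =====
-- Pre_ excludes exactly the inputs where Python A raises IndexError (start_index below -len(lines)); B raises there too.
def Pre_consume_slide_frontmatter_py (lines : List String) (start_index : Int) : Prop :=
  -(lines.length : Int) ≤ start_index
instance (lines : List String) (start_index : Int) : Decidable (Pre_consume_slide_frontmatter_py lines start_index) := by unfold Pre_consume_slide_frontmatter_py; infer_instance

def pvWitness_consume_slide_frontmatter_py : List String × Int := (["title: x", "---"], 0)

def Spec_consume_slide_frontmatter_py (lines : List String) (start_index : Int) (out : Option (List String) × Int) : Prop := out = consume_slide_frontmatter_py_alt lines start_index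
instance (lines : List String) (start_index : Int) (out : Option (List String) × Int) : Decidable (Spec_consume_slide_frontmatter_py lines start_index out) := by unfold Spec_consume_slide_frontmatter_py; infer_instance

-- ===== CLAIM (what is proved, stated in full; the proofs are below) =====
def Claim_equal_consume_slide_frontmatter_py : Prop := ∀ (lines : List String) (start_index : Int), Dom_consume_slide_frontmatter_py lines start_index → Pre_consume_slide_frontmatter_py lines start_index → Spec_consume_slide_frontmatter_py lines start_index (consume_slide_frontmatter_py lines start_index)

-- ===== LEMMAS AND PROOFS =====

def pvValid (s : String) : Bool := PySem.Str.isIn ":" s && !(PySem.Str.startswith s "::")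

lemma pvLoop_eq_aux (lines : List String) (si : Int) :
    ∀ (n : Nat) (index : Int), ((lines.length : Int) - index).toNat ≤ n →
    ∀ (block : List String) (hm av : Bool),
      si ≤ index →
      block = (PySem.List.pyRange si index 1).map (fun i => PySem.List.pyGetD lines i "") →
      hm = !(pvMeaningful block).isEmpty →
      av = (pvMeaningful block).all pvValid →
      pvALoop lines si index block = pvBLoop lines si index hm av := by
  intro n
  induction n with
  | zero =>
    intro index hn block hm av _ _ _ _
    have h : ¬ index < (lines.length : Int) := by omega
    rw [pvALoop, pvBLoop, dif_neg h, dif_neg h]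
  | succ n ih =>
    intro index hn block hm av hle hb hhm hav
    rw [pvALoop, pvBLoop]
    by_cases h : index < (lines.length : Int)
    · rw [dif_pos h, dif_pos h]
      set l := PySem.List.pyGetD lines index "" with hl
      clear_value l
      by_cases hdel : PySem.Str.strip l = "---"
      · have hlook : pvLooksLike block = (hm && av) := by
          rw [pvLooksLike, hhm, hav]
          by_cases he : (pvMeaningful block).isEmpty
          · simp [he]
          · have he' : (pvMeaningful block).isEmpty = false := by simpa using he
            rw [if_neg he, he']
            simp only [Bool.not_false, Bool.true_and]
            rfl
        simp only [if_pos hdel, hlook]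
        cases hm && av <;> simp [hb]
      · simp only [if_neg hdel]
        have hb' : block ++ [l] =
            (PySem.List.pyRange si (index + 1) 1).map (fun i => PySem.List.pyGetD lines i "") := by
          rw [PySem.List.pyRange_one_succ_right hle, List.map_append, ← hb]
          simp [hl]
        cases hP : (decide (PySem.Str.strip l ≠ "") && !(PySem.Str.startswith (PySem.Str.strip l) "#")) with
        | true =>
          obtain ⟨h1, h2⟩ : PySem.Str.strip l ≠ "" ∧ PySem.Str.startswith (PySem.Str.strip l) "#" = false := by
            simpa using hP
          have hm2 : pvMeaningful (block ++ [l]) = pvMeaningful block ++ [PySem.Str.strip l] := by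
            simp only [pvMeaningful, List.filter_append, List.map_append]
            refine congrArg _ ?_
            rw [List.filter_cons, List.filter_nil, if_pos]
            · simp
            · exact hP
          rw [if_pos rfl]
          apply ih (index + 1) (by omega) _ _ _ (by omega) hb'
          · rw [hm2]; simp
          · rw [hm2, List.all_append, ← hav]
            simp [pvValid, Bool.and_assoc]
        | false =>
          have hor : PySem.Str.strip l = "" ∨ PySem.Str.startswith (PySem.Str.strip l) "#" = true := by
            simpa [Decidable.or_iff_not_imp_left] using hP
          have hm2 : pvMeaningful (block ++ [l]) = pvMeaningful block := by
            rcases hor with h1 | h2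
            · simp [pvMeaningful, List.filter_append, h1]
            · have h2' : PySem.Chars.startswith (PySem.Chars.strip l.toList) ['#'] = true := by
                simpa using h2
              simp [pvMeaningful, List.filter_append, h2']
          rw [if_neg Bool.false_ne_true]
          apply ih (index + 1) (by omega) _ _ _ (by omega) hb'
          · rw [hm2]; exact hhm
          · rw [hm2]; exact hav
    · rw [dif_neg h, dif_neg h]

-- ===== VERDICT (by name: the statement is the Claim_ definition above) =====
theorem consume_slide_frontmatter_py_spec : Claim_equal_consume_slide_frontmatter_py := by
  intro lines si _ _
  unfold Spec_consume_slide_frontmatter_py consume_slide_frontmatter_py consume_slide_frontmatter_py_alt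
  exact (pvLoop_eq_aux lines si ((lines.length : Int) - si).toNat si le_rfl [] false true le_rfl
    (by rw [PySem.List.pyRange_one_eq_nil le_rfl]; rfl) (by rfl) (by rfl))
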